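-- pv_equiv track=rewrite | github.com/agalitsyn/play | 56/mixes.py | find_mixes
-- ===== SOURCE A (Python) =====
-- def find_mixes(tobaccos, mixes):
--     tobacco_dict = {}
--     for manufacturer, flavour in tobaccos:
--         if flavour not in tobacco_dict:
--             tobacco_dict[flavour] = [manufacturer]
--         elif manufacturer not in tobacco_dict[flavour]:
--             tobacco_dict[flavour].append(manufacturer)
--
--     result = []
--     for mix in mixes:
--         aggr_flavours = []
--         for flavour in mix:
--             aggr_flavours.append((flavour, tobacco_dict.get(flavour, [])))
--         result.append(aggr_flavours)
--
--     return result
-- ===== SOURCE B (Python) =====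
-- def find_mixes(tobaccos, mixes):
--     # No index is built: each flavour is answered by a direct scan of tobaccos,
--     # dedup-ing manufacturers in first-occurrence order.
--     def manufacturers(flavour):
--         return list(dict.fromkeys(m for m, f in tobaccos if f == flavour))
--     return [[(flavour, manufacturers(flavour)) for flavour in mix] for mix in mixes]
-- ===== Notes on version B (the rewrite author's own statement) =====
-- stated objective: alternative
-- what changed: Drops A's precomputed flavour-to-manufacturers dict entirely: B answers each flavour by a direct filtering scan of tobaccos followed by an ordered dedup (dict.fromkeys), trading A's one-time index build for per-query scans.
import Mathlib
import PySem

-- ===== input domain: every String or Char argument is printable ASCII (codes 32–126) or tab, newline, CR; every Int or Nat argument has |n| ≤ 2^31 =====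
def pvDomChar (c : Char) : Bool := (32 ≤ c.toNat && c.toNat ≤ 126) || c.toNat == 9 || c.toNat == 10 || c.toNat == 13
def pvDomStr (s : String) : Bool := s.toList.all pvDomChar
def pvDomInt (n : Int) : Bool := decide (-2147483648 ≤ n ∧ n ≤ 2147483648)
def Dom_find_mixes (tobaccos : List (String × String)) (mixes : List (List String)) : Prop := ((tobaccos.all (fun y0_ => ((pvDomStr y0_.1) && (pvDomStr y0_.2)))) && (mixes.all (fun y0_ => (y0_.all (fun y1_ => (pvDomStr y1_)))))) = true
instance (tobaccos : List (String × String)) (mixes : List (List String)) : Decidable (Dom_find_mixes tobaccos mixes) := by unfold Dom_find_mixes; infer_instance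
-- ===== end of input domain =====

-- B builds no index at all: each flavour is answered by a direct filtering scan of
-- tobaccos plus an ordered dedup, instead of A's precomputed dict (alternative, same results).

-- ===== PORT A =====
-- one iteration of A's first loop: the if/elif on tobacco_dict
def find_mixes_step (d : PySem.Dict String (List String)) (p : String × String) :
    PySem.Dict String (List String) :=
  match d.get? p.2 with
  | none => d.insert p.2 [p.1]
  | some ms => if ms.contains p.1 then d else d.insert p.2 (ms ++ [p.1])

def find_mixes (tobaccos : List (String × String)) (mixes : List (List String)) :
    List (List (String × List String)) :=
  let tobacco_dict := tobaccos.foldl find_mixes_step PySem.Dict.empty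
  mixes.foldl (fun result mix =>
    result ++ [mix.foldl (fun aggr flavour => aggr ++ [(flavour, tobacco_dict.getD flavour [])]) []]) []

-- ===== PORT B =====
-- manufacturers(flavour): scan tobaccos, keep matches, ordered dedup (dict.fromkeys)
def find_mixes_manufacturers (tobaccos : List (String × String)) (flavour : String) :
    List String :=
  PySem.List.dedup ((tobaccos.filter (fun p => p.2 == flavour)).map (·.1))

def find_mixes_alt (tobaccos : List (String × String)) (mixes : List (List String)) :
    List (List (String × List String)) :=
  mixes.map (fun mix => mix.map (fun flavour => (flavour, find_mixes_manufacturers tobaccos flavour)))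

-- ===== PRECONDITION & SPEC =====
def Spec_find_mixes (tobaccos : List (String × String)) (mixes : List (List String)) (out : List (List (String × List String))) : Prop := out = find_mixes_alt tobaccos mixes
instance (tobaccos : List (String × String)) (mixes : List (List String)) (out : List (List (String × List String))) : Decidable (Spec_find_mixes tobaccos mixes out) := by unfold Spec_find_mixes; infer_instance

-- ===== CLAIM (what is proved, stated in full; the proofs are below) =====
def Claim_equal_find_mixes : Prop := ∀ (tobaccos : List (String × String)) (mixes : List (List String)), Dom_find_mixes tobaccos mixes → Spec_find_mixes tobaccos mixes (find_mixes tobaccos mixes)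

-- ===== LEMMAS AND PROOFS =====

-- what A's first loop holds at flavour f: the already-deduped manufacturers,
-- i.e. the start value Set.updated by the manufacturers whose flavour is f
theorem find_mixes_A_getD (l : List (String × String))
    (d : PySem.Dict String (List String)) (f : String) :
    (l.foldl find_mixes_step d).getD f [] =
      PySem.Set.update (d.getD f []) ((l.filter (fun p => p.2 == f)).map (·.1)) := by
  induction l generalizing d with
  | nil => simp [PySem.Set.update]
  | cons p l ih =>
    have hstep : (find_mixes_step d p).getD f [] =
        if p.2 == f then PySem.Set.add (d.getD f []) p.1 else d.getD f [] := by
      by_cases hf : p.2 = f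
      · subst hf
        simp only [beq_self_eq_true, if_true]
        unfold find_mixes_step
        cases hg : d.get? p.2 with
        | none =>
          dsimp only
          rw [PySem.Dict.getD_of_get?_eq_none d [] hg, PySem.Dict.getD_insert_self]
          simp [PySem.Set.add]
        | some ms =>
          dsimp only
          rw [PySem.Dict.getD_of_get?_eq_some d [] hg]
          by_cases hm : p.1 ∈ ms
          · rw [if_pos (by simpa using hm), PySem.Set.add_of_mem hm]
            exact PySem.Dict.getD_of_get?_eq_some d [] hg
          · rw [if_neg (by simpa using hm), PySem.Set.add_of_not_mem hm]
            exact PySem.Dict.getD_insert_self d p.2 (ms ++ [p.1]) []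
      · have hbe : (p.2 == f) = false := by simp [hf]
        simp only [hbe, Bool.false_eq_true, if_false]
        unfold find_mixes_step
        cases hg : d.get? p.2 with
        | none => exact PySem.Dict.getD_insert_of_ne d _ _ (Ne.symm hf)
        | some ms =>
          dsimp only
          by_cases hm : p.1 ∈ ms
          · rw [if_pos (by simpa using hm)]
          · rw [if_neg (by simpa using hm)]
            exact PySem.Dict.getD_insert_of_ne d _ _ (Ne.symm hf)
    rw [List.foldl_cons, ih, hstep]
    by_cases hf : p.2 = f
    · simp [hf, PySem.Set.update_cons]
    · simp [hf]

-- the per-flavour value of A's dict equals B's direct scan-and-dedup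
theorem find_mixes_values (tobaccos : List (String × String)) (f : String) :
    (tobaccos.foldl find_mixes_step PySem.Dict.empty).getD f [] =
      find_mixes_manufacturers tobaccos f := by
  rw [find_mixes_A_getD]
  simp [find_mixes_manufacturers, PySem.Set.update_nil_left]

-- ===== VERDICT (by name: the statement is the Claim_ definition above) =====
theorem find_mixes_spec : Claim_equal_find_mixes := by
  intro tobaccos mixes _
  unfold Spec_find_mixes
  simp only [find_mixes, find_mixes_alt, PySem.List.foldl_append_singleton_eq_map,
    List.nil_append]
  refine List.map_congr_left (fun mix _ => ?_)
  exact List.map_congr_left (fun flavour _ => by rw [find_mixes_values])
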